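-- pv_equiv track=rewrite | github.com/mage-ai/llm_orchestration | utils/topic_summary_processor.py | redistribute_items_evenly
-- ===== SOURCE A (Python) =====
-- def redistribute_items_evenly(list_of_lists):
--     # Flatten the list of lists while preserving order
--     flattened_items = [item for sublist in list_of_lists for item in sublist]
--     total_items = len(flattened_items)
--
--     # Calculate the number of sub-lists to determine how to redistribute items evenly
--     num_lists = len(list_of_lists)
--
--     # Calculate the new size for all sub-lists (minimal size)
--     min_items_per_list = total_items // num_lists
--
--     # Calculate the number of sub-lists that should have one more item (to handle remainder items)
--     num_lists_with_extra_item = total_items % num_lists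
--
--     # Initialize variables to help with redistribution
--     new_list_of_lists = []
--     current_index = 0
--
--     # Distribute items evenly, respecting original order
--     for _ in range(num_lists):
--         # Determine the size of the current sub-list
--         current_sublist_size = min_items_per_list
--         if num_lists_with_extra_item > 0:
--             current_sublist_size += 1
--             num_lists_with_extra_item -= 1
--
--         # Extract the current sub-list from the flattened list
--         current_sublist = flattened_items[current_index:current_index + current_sublist_size]
--         new_list_of_lists.append(current_sublist)
--
--         # Update the current index
--         current_index += current_sublist_size
--
--     return new_list_of_lists
-- ===== SOURCE B (Python) =====
-- def redistribute_items_evenly(list_of_lists):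
--     flattened = [item for sublist in list_of_lists for item in sublist]
--
--     def split(items, parts):
--         # Peel off the fair share of the REMAINING items (rounded up) and recurse;
--         # no precomputed quotient/remainder, no running index.
--         if parts == 0:
--             return []
--         size = -(-len(items) // parts)  # ceil division
--         return [items[:size]] + split(items[size:], parts - 1)
--
--     return split(flattened, len(list_of_lists))
-- ===== Notes on version B (the rewrite author's own statement) =====
-- stated objective: alternative
-- what changed: Instead of A's single loop that precomputes quotient/remainder and walks a running index while decrementing an extra-item counter, B recursively peels off the ceiling fair share ceil(len(remaining)/parts) of the remaining items at each step, recomputing the share from what is left; no remainder, index or counter is carried.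
import Mathlib
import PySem

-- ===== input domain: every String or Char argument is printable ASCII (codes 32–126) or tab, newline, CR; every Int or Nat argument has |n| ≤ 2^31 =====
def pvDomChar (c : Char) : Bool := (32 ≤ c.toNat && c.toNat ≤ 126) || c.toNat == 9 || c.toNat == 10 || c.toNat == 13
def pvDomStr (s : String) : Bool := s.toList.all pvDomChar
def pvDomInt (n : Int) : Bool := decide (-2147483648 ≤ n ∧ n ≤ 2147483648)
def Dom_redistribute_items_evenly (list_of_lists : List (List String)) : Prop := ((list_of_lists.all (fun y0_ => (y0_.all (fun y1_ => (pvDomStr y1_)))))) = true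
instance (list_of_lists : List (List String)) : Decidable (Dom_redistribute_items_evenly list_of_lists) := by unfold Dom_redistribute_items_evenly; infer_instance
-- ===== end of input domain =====

-- B replaces A's accumulator loop (precomputed quotient/remainder, running index, decrementing
-- extra counter) with a recursion that peels the ceiling fair share of the REMAINING items at
-- each step (alternative decomposition). On the empty input A raises ZeroDivisionError; B returns [].


-- ===== PORT A =====
-- literal transliteration of A: flatten, compute //, %, then a fold over range(num_lists)
-- carrying (new_list_of_lists, current_index, num_lists_with_extra_item)
def redistribute_items_evenly (list_of_lists : List (List String)) : List (List String) :=
  let flattened_items : List String := list_of_lists.flatMap (fun sublist => sublist)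
  let total_items : Int := flattened_items.length
  let num_lists : Int := list_of_lists.length
  let min_items_per_list : Int := PySem.Int.floordiv total_items num_lists
  let num_lists_with_extra_item : Int := PySem.Int.mod total_items num_lists
  let st := (PySem.List.pyRange 0 num_lists 1).foldl
    (fun (st : List (List String) × Int × Int) _ =>
      let new_list_of_lists := st.1
      let current_index := st.2.1
      let extra := st.2.2
      let current_sublist_size := min_items_per_list + (if extra > 0 then 1 else 0)
      let extra' := if extra > 0 then extra - 1 else extra
      let current_sublist := PySem.List.slice flattened_items (some current_index)
        (some (current_index + current_sublist_size))
      (new_list_of_lists ++ [current_sublist], current_index + current_sublist_size, extra'))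
    ([], 0, num_lists_with_extra_item)
  st.1

-- ===== PORT B =====
-- literal transliteration of B's inner 'split': if parts == 0 return [];
-- size = -(-len(items) // parts) (ceil), emit items[:size], recurse on items[size:].
-- ('parts' is a Nat: Python's parts starts at len(list_of_lists) ≥ 0 and only decrements to 0.)
def pvSplitCeil (items : List String) : Nat → List (List String)
  | 0 => []
  | p + 1 =>
    let size : Int := -(PySem.Int.floordiv (-(items.length : Int)) ((p + 1 : Nat) : Int))
    [PySem.List.slice items none (some size)] ++
      pvSplitCeil (PySem.List.slice items (some size) none) p

def redistribute_items_evenly_alt (list_of_lists : List (List String)) : List (List String) :=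
  let flattened : List String := list_of_lists.flatMap (fun sublist => sublist)
  pvSplitCeil flattened list_of_lists.length

-- ===== PRECONDITION & SPEC =====
-- Pre_ excludes only the empty list, on which A raises ZeroDivisionError.
def Pre_redistribute_items_evenly (list_of_lists : List (List String)) : Prop := list_of_lists ≠ []
instance (list_of_lists : List (List String)) : Decidable (Pre_redistribute_items_evenly list_of_lists) := by unfold Pre_redistribute_items_evenly; infer_instance
def pvWitness_redistribute_items_evenly : List (List String) := [["a", "b"], [], ["c"]]
def Spec_redistribute_items_evenly (list_of_lists : List (List String)) (out : List (List String)) : Prop := out = redistribute_items_evenly_alt list_of_lists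
instance (list_of_lists : List (List String)) (out : List (List String)) : Decidable (Spec_redistribute_items_evenly list_of_lists out) := by unfold Spec_redistribute_items_evenly; infer_instance

-- ===== CLAIM (what is proved, stated in full; the proofs are below) =====
def Claim_equal_redistribute_items_evenly : Prop := ∀ (list_of_lists : List (List String)), Dom_redistribute_items_evenly list_of_lists → Pre_redistribute_items_evenly list_of_lists → Spec_redistribute_items_evenly list_of_lists (redistribute_items_evenly list_of_lists)

-- ===== LEMMAS AND PROOFS =====

-- Loop invariant for A: starting the fold at index j with current_index = j*k + min j m and
-- extra = m - min j m, it appends the closed-form slices for indices j..n-1.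
lemma redistribute_loop
    (fl : List String) (k m : Int) :
    ∀ (N : Nat) (j : Int) (acc : List (List String)),
    (PySem.List.pyRange j (j + N) 1).foldl
      (fun (st : List (List String) × Int × Int) _ =>
        let size := k + (if st.2.2 > 0 then 1 else 0)
        let extra' := if st.2.2 > 0 then st.2.2 - 1 else st.2.2
        (st.1 ++ [PySem.List.slice fl (some st.2.1) (some (st.2.1 + size))],
         st.2.1 + size, extra'))
      (acc, j * k + min j m, m - min j m)
    = (acc ++ (PySem.List.pyRange j (j + N) 1).map (fun i =>
          PySem.List.slice fl (some (i * k + min i m)) (some ((i + 1) * k + min (i + 1) m))),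
       (j + N) * k + min (j + N) m, m - min (j + N) m) := by
  intro N
  induction N with
  | zero =>
    intro j acc
    rw [PySem.List.pyRange_one_eq_nil (by omega)]
    simp
  | succ N ih =>
    intro j acc
    rw [PySem.List.pyRange_one_cons (by omega)]
    simp only [List.foldl_cons, List.map_cons]
    have hidx : j * k + min j m + (k + (if m - min j m > 0 then 1 else 0))
        = (j + 1) * k + min (j + 1) m := by
      by_cases h : j < m
      · rw [if_pos (by omega : m - min j m > 0),
            show (j + 1) * k = j * k + k from by ring]
        generalize j * k = x
        omega
      · rw [if_neg (by omega : ¬ m - min j m > 0),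
            show (j + 1) * k = j * k + k from by ring]
        generalize j * k = x
        omega
    have hext : (if m - min j m > 0 then m - min j m - 1 else m - min j m)
        = m - min (j + 1) m := by
      by_cases h : j < m
      · rw [if_pos (by omega : m - min j m > 0)]; omega
      · rw [if_neg (by omega : ¬ m - min j m > 0)]; omega
    rw [show ((j + (N + 1 : Nat)) : Int) = (j + 1) + N by omega]
    have := ih (j + 1) (acc ++ [PySem.List.slice fl (some (j * k + min j m))
        (some ((j + 1) * k + min (j + 1) m))])
    simp only [hidx, hext] at *
    rw [this]
    simp

-- slices of a dropped prefix are slices of the original, shifted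
lemma slice_drop (xs : List String) (s : Nat) (a b : Int) (ha : 0 ≤ a) (hb : 0 ≤ b) :
    PySem.List.slice (xs.drop s) (some a) (some b)
      = PySem.List.slice xs (some ((s : Int) + a)) (some ((s : Int) + b)) := by
  have h1 : ((s : Int) + a).toNat = a.toNat + s := by omega
  have h2 : ((s : Int) + b).toNat = b.toNat + s := by omega
  rw [PySem.List.slice_toNat _ ha hb, PySem.List.slice_toNat _ (by omega) (by omega),
      List.drop_drop, h1, h2,
      show b.toNat + s - (a.toNat + s) = b.toNat - a.toNat from by omega,
      Nat.add_comm a.toNat s]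

-- Characterization of B's recursion by the same closed-form slices as A's loop.
lemma splitCeil_eq (n : Nat) : ∀ (fl : List String),
    pvSplitCeil fl n = (List.range n).map (fun (i : Nat) =>
      PySem.List.slice fl
        (some ((i : Int) * PySem.Int.floordiv (fl.length : Int) (n : Int)
                + min (i : Int) (PySem.Int.mod (fl.length : Int) (n : Int))))
        (some (((i : Int) + 1) * PySem.Int.floordiv (fl.length : Int) (n : Int)
                + min ((i : Int) + 1) (PySem.Int.mod (fl.length : Int) (n : Int))))) := by
  induction n with
  | zero => intro fl; simp [pvSplitCeil]
  | succ p ih =>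
    intro fl
    have hnpos : (0 : Int) < ((p + 1 : Nat) : Int) := by push_cast; omega
    set k : Int := PySem.Int.floordiv (fl.length : Int) ((p + 1 : Nat) : Int) with hk
    set m : Int := PySem.Int.mod (fl.length : Int) ((p + 1 : Nat) : Int) with hm
    have hkv : k = ((fl.length / (p + 1) : Nat) : Int) := by
      rw [hk]; exact_mod_cast PySem.Int.floordiv_natCast fl.length (p + 1)
    have hmv : m = ((fl.length % (p + 1) : Nat) : Int) := by
      rw [hm]; exact_mod_cast PySem.Int.mod_natCast fl.length (p + 1)
    have hk0 : 0 ≤ k := by rw [hkv]; positivity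
    have hm0 : 0 ≤ m := by rw [hmv]; positivity
    have hmlt : m < (p : Int) + 1 := by
      rw [hmv]; exact_mod_cast Nat.mod_lt fl.length (Nat.succ_pos p)
    have hT : (fl.length : Int) = ((p : Int) + 1) * k + m := by
      have h3 := Nat.div_add_mod fl.length (p + 1)
      have : (((p + 1) * (fl.length / (p + 1)) + fl.length % (p + 1) : Nat) : Int)
          = (fl.length : Int) := by exact_mod_cast congrArg (Nat.cast (R := Int)) h3
      rw [hkv, hmv]; push_cast at this ⊢; linarith
    set c : Int := if 0 < m then 1 else 0 with hc
    have hc01 : 0 ≤ c ∧ c ≤ 1 := by rw [hc]; split_ifs <;> omega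
    have hmc : 0 ≤ m - c := by rw [hc]; split_ifs <;> omega
    have hsize : -(PySem.Int.floordiv (-(fl.length : Int)) ((p + 1 : Nat) : Int)) = k + c := by
      rw [PySem.Int.neg_floordiv_neg_eq_iff_of_pos hnpos]
      push_cast
      rw [hc]
      constructor
      · split_ifs with h <;> nlinarith
      · split_ifs with h <;> nlinarith
    have hsle : k + c ≤ (fl.length : Int) := by
      rw [hc] at *; split_ifs with h <;> nlinarith
    -- shared index arithmetic
    have key : ∀ (j : Int), 0 ≤ j →
        (k + c) + (j * k + min j (m - c)) = (j + 1) * k + min (j + 1) m := by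
      intro j hj
      rw [show (j + 1) * k = j * k + k from by ring, hc]
      split_ifs with h <;> (generalize j * k = x; omega)
    simp only [pvSplitCeil]
    rw [hsize, PySem.List.slice_to fl (by omega), PySem.List.slice_from fl (by omega), ih]
    have hrlen : ((fl.drop (k + c).toNat).length : Int) = (fl.length : Int) - (k + c) := by
      rw [List.length_drop]; omega
    simp only [List.range_succ_eq_map, List.map_cons, List.map_map, List.singleton_append]
    congr 1
    · -- head: fl[:k+c] is the closed-form slice at index 0
      have e0 : ((0 : Nat) : Int) * k + min ((0 : Nat) : Int) m = 0 := by
        push_cast; omega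
      have e1 : (((0 : Nat) : Int) + 1) * k + min (((0 : Nat) : Int) + 1) m = k + c := by
        push_cast
        rw [one_mul, hc]
        split_ifs with h <;> omega
      show List.take (k + c).toNat fl
          = PySem.List.slice fl (some (((0 : Nat) : Int) * k + min ((0 : Nat) : Int) m))
              (some ((((0 : Nat) : Int) + 1) * k + min (((0 : Nat) : Int) + 1) m))
      rw [e0, e1, PySem.List.slice_zero_start, PySem.List.slice_to fl (by omega)]
    · -- tail: shifted slices of the dropped remainder
      by_cases hp : p = 0
      · subst hp; simp
      have hp1 : (0 : Int) < (p : Int) := by exact_mod_cast Nat.pos_of_ne_zero hp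
      have hK : PySem.Int.floordiv ((fl.drop (k + c).toNat).length : Int) ((p : Nat) : Int)
          = k := by
        rw [hrlen, PySem.Int.floordiv_eq_iff_of_pos hp1]
        rw [hc] at *
        constructor
        · split_ifs with h <;> nlinarith
        · split_ifs with h <;> nlinarith
      have hM : PySem.Int.mod ((fl.drop (k + c).toNat).length : Int) ((p : Nat) : Int)
          = m - c := by
        have h5 := PySem.Int.floordiv_mul_add_mod ((fl.drop (k + c).toNat).length : Int)
          ((p : Nat) : Int)
        rw [hK] at h5
        rw [hrlen] at h5 ⊢
        have hexp : ((p : Int) + 1) * k = k * (p : Int) + k := by ring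
        linarith
      refine List.map_congr_left (fun i _ => ?_)
      simp only [Function.comp_apply]
      rw [hK, hM]
      have hnonA : 0 ≤ (i : Int) * k + min (i : Int) (m - c) :=
        add_nonneg (mul_nonneg (Int.natCast_nonneg i) hk0) (le_min (Int.natCast_nonneg i) hmc)
      have hnonB : 0 ≤ ((i : Int) + 1) * k + min ((i : Int) + 1) (m - c) :=
        add_nonneg (mul_nonneg (by positivity) hk0) (le_min (by positivity) hmc)
      rw [slice_drop fl _ _ _ hnonA hnonB,
          show (((k + c).toNat : Int)) = k + c from by omega]
      congr 2
      · push_cast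
        exact key _ (Int.natCast_nonneg i)
      · push_cast
        exact key _ (by positivity)

-- ===== VERDICT (by name: the statements are the Claim_ definitions above) =====
theorem redistribute_items_evenly_spec : Claim_equal_redistribute_items_evenly := by
  intro L _ hpre
  unfold Spec_redistribute_items_evenly redistribute_items_evenly redistribute_items_evenly_alt
  have hn : (0 : Int) < (L.length : Int) := by
    have := List.length_pos_iff.mpr hpre
    omega
  set fl := L.flatMap (fun sublist => sublist) with hfl
  set k := PySem.Int.floordiv (fl.length : Int) (L.length : Int) with hk
  set m := PySem.Int.mod (fl.length : Int) (L.length : Int) with hm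
  have hm0 : 0 ≤ m := by
    rw [hm, show ((L.length : Int)) = ((L.length : Nat) : Int) from rfl,
        PySem.Int.mod_natCast]
    positivity
  have hA := redistribute_loop fl k m L.length 0 []
  rw [show (0 : Int) + (L.length : Int) = (L.length : Int) from by omega] at hA
  simp only [zero_mul, min_eq_left hm0, add_zero, sub_zero, List.nil_append] at hA
  have hA1 := congrArg Prod.fst hA
  dsimp only at hA1
  rw [splitCeil_eq, ← hk, ← hm]
  refine Eq.trans hA1 ?_
  rw [PySem.List.pyRange_one, List.map_map,
      show ((L.length : Int) - 0).toNat = L.length from by omega]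
  refine List.map_congr_left (fun j _ => ?_)
  simp [Function.comp_apply]
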